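-- pv_equiv track=rewrite | github.com/PRKKILLER/Algorithm_Practice | Company-OA/Robinhood/DivisorSubstring.py | solution
-- ===== SOURCE A (Python) =====
-- def solution(n: int, k: int) -> int:
--     n_s = str(n)
--     l = len(n_s)
--     i = 0
--     cnt = 0
--     s = set()
--     while i + k <= l:
--         divisor = int(n_s[i:i+k])
--         if divisor in s:
--             i += 1
--             continue
--
--         if divisor == 0:
--             i += 1
--         else:
--             if n % divisor == 0:
--                 cnt += 1
--                 s.add(divisor)
--
--             i += 1
--
--     return cnt
-- ===== SOURCE B (Python) =====
-- def solution(n: int, k: int) -> int: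
--     n_s = str(n)
--     vals = sorted(int(n_s[i:i + k]) for i in range(len(n_s) - k + 1))
--     cnt = 0
--     prev = None
--     for d in vals:
--         if d != prev:
--             prev = d
--             if d != 0 and n % d == 0:
--                 cnt += 1
--     return cnt
-- ===== Notes on version B (the rewrite author's own statement) =====
-- stated objective: alternative
-- what changed: A deduplicates on the fly with a hash set inside one interleaved while-loop; B sorts the window values and deduplicates by comparing each element with its predecessor in a single linear scan, using no set at all.
import Mathlib
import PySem

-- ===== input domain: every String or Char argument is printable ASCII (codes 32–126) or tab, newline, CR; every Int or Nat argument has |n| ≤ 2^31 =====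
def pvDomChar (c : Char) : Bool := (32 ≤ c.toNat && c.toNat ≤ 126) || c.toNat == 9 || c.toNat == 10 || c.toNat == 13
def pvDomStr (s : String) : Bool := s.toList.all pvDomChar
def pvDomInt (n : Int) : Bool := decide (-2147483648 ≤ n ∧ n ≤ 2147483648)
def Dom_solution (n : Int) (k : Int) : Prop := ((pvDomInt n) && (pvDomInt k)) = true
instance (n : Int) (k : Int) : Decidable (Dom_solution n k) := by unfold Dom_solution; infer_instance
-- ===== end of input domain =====

-- B replaces A's interleaved scan (hash set of already-counted divisors inside the while-loop)
-- by sort-then-scan: sort the window values, then count first occurrences that are nonzero divisors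
-- by comparing each element with its predecessor — no set at all.


-- ===== PORT A =====
-- int(n_s[i:i+k]); PySem.Int.ofChars? is none exactly where Python's int raises ValueError —
-- those inputs (k ≤ 0, or n < 0 with k = 1) are excluded by Pre_solution; the default 0 is never reached inside Pre_.
def windowVal (cs : List Char) (k : Int) (i : Int) : Int :=
  (PySem.Int.ofChars? (PySem.List.slice cs (some i) (some (i + k)))).getD 0

-- the while-loop of A; fuel = cs.length + 1 bounds the number of iterations on every input inside Pre_
def solutionGo (n : Int) (k : Int) (cs : List Char) : Nat → Int → Int → PySem.Set Int → Int
  | 0, _, cnt, _ => cnt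
  | fuel + 1, i, cnt, s =>
    if i + k ≤ (cs.length : Int) then
      let divisor := windowVal cs k i
      if PySem.Set.contains s divisor then solutionGo n k cs fuel (i + 1) cnt s
      else if divisor = 0 then solutionGo n k cs fuel (i + 1) cnt s
      else if PySem.Int.mod n divisor = 0 then
        solutionGo n k cs fuel (i + 1) (cnt + 1) (PySem.Set.add s divisor)
      else solutionGo n k cs fuel (i + 1) cnt s
    else cnt

def solution (n : Int) (k : Int) : Int :=
  let cs := PySem.Int.toChars n
  solutionGo n k cs (cs.length + 1) 0 0 PySem.Set.empty

-- ===== PORT B =====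
-- the for-loop of B: prev is the last element that opened a new run (None before the first)
def altScan (n : Int) : List Int → Option Int → Int → Int
  | [], _, cnt => cnt
  | d :: rest, prev, cnt =>
    if prev ≠ some d then
      if d ≠ 0 ∧ PySem.Int.mod n d = 0 then altScan n rest (some d) (cnt + 1)
      else altScan n rest (some d) cnt
    else altScan n rest prev cnt

def solution_alt (n : Int) (k : Int) : Int :=
  let cs := PySem.Int.toChars n
  let vals := PySem.List.sorted
    ((PySem.List.pyRange 0 ((cs.length : Int) - k + 1) 1).map (windowVal cs k)) (fun x => x) false
  altScan n vals none 0

-- ===== PRECONDITION & SPEC =====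
-- Pre_ excludes exactly the inputs on which A raises ValueError in int(): k ≤ 0 (empty substring),
-- or n < 0 with k = 1 (the substring "-" alone).
def Pre_solution (n : Int) (k : Int) : Prop := 1 ≤ k ∧ (0 ≤ n ∨ 2 ≤ k)
instance (n : Int) (k : Int) : Decidable (Pre_solution n k) := by unfold Pre_solution; infer_instance
def pvWitness_solution : Int × Int := (120, 1)

def Spec_solution (n : Int) (k : Int) (out : Int) : Prop := out = solution_alt n k
instance (n : Int) (k : Int) (out : Int) : Decidable (Spec_solution n k out) := by unfold Spec_solution; infer_instance

-- ===== CLAIM (what is proved, stated in full; the proofs are below) =====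
def Claim_equal_solution : Prop := ∀ (n : Int) (k : Int), Dom_solution n k → Pre_solution n k → Spec_solution n k (solution n k)

-- ===== LEMMAS AND PROOFS =====

-- invariant of A's loop: from position i on, it adds the number of distinct window values,
-- not yet in s, that are nonzero divisors of n
theorem solutionGo_eq (n k : Int) (cs : List Char) (fuel : Nat) :
    ∀ (i cnt : Int) (s : PySem.Set Int),
      (((cs.length : Int) - k + 1) - i).toNat ≤ fuel →
      solutionGo n k cs fuel i cnt s =
        cnt + ((((PySem.List.pyRange i ((cs.length : Int) - k + 1) 1).map (windowVal cs k)).toFinset.filter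
          (fun d => d ∉ s ∧ d ≠ 0 ∧ PySem.Int.mod n d = 0)).card : Int) := by
  induction fuel with
  | zero =>
    intro i cnt s hfuel
    rw [PySem.List.pyRange_one_eq_nil (by omega)]
    simp [solutionGo]
  | succ fuel ih =>
    intro i cnt s hfuel
    by_cases hcond : i + k ≤ (cs.length : Int)
    · rw [PySem.List.pyRange_one_cons (by omega)]
      simp only [solutionGo, if_pos hcond, List.map_cons, List.toFinset_cons, Finset.filter_insert]
      set v := windowVal cs k i with hv
      by_cases hmem : v ∈ s
      · rw [if_pos (show PySem.Set.contains s v = true by simp [PySem.Set.contains, hmem]),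
          if_neg (show ¬ (v ∉ s ∧ v ≠ 0 ∧ PySem.Int.mod n v = 0) by simp [hmem])]
        exact ih (i + 1) cnt s (by omega)
      · rw [if_neg (show ¬ (PySem.Set.contains s v = true) by simp [PySem.Set.contains, hmem])]
        by_cases hz : v = 0
        · rw [if_pos hz, if_neg (show ¬ (v ∉ s ∧ v ≠ 0 ∧ PySem.Int.mod n v = 0) by simp [hz])]
          exact ih (i + 1) cnt s (by omega)
        · rw [if_neg hz]
          by_cases hm : PySem.Int.mod n v = 0
          · rw [if_pos hm, if_pos ⟨hmem, hz, hm⟩]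
            rw [ih (i + 1) (cnt + 1) (PySem.Set.add s v) (by omega)]
            have herase :
                (((PySem.List.pyRange (i+1) ((cs.length : Int) - k + 1) 1).map (windowVal cs k)).toFinset.filter
                  (fun d => d ∉ PySem.Set.add s v ∧ d ≠ 0 ∧ PySem.Int.mod n d = 0)) =
                (((PySem.List.pyRange (i+1) ((cs.length : Int) - k + 1) 1).map (windowVal cs k)).toFinset.filter
                  (fun d => d ∉ s ∧ d ≠ 0 ∧ PySem.Int.mod n d = 0)).erase v := by
              ext x
              simp only [Finset.mem_filter, Finset.mem_erase, PySem.Set.mem_add]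
              tauto
            rw [herase]
            set F := (((PySem.List.pyRange (i+1) ((cs.length : Int) - k + 1) 1).map (windowVal cs k)).toFinset.filter
              (fun d => d ∉ s ∧ d ≠ 0 ∧ PySem.Int.mod n d = 0)) with hF
            have hins : insert v F = insert v (F.erase v) := by
              ext x
              simp only [Finset.mem_insert, Finset.mem_erase]
              tauto
            rw [hins, Finset.card_insert_of_notMem (Finset.notMem_erase v F)]
            push_cast
            ring
          · rw [if_neg hm, if_neg (show ¬ (v ∉ s ∧ v ≠ 0 ∧ PySem.Int.mod n v = 0) by tauto)]
            exact ih (i + 1) cnt s (by omega)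
    · rw [PySem.List.pyRange_one_eq_nil (by omega)]
      simp [solutionGo, hcond]

-- invariant of B's scan over an ascending list: with prev a lower bound of the list, it adds
-- the number of distinct elements other than prev that are nonzero divisors of n
theorem altScan_eq (n : Int) :
    ∀ (l : List Int) (prev : Option Int) (cnt : Int),
      l.Pairwise (· ≤ ·) →
      (∀ x ∈ l, ∀ p, prev = some p → p ≤ x) →
      altScan n l prev cnt =
        cnt + (((l.toFinset.filter (fun d => d ≠ 0 ∧ PySem.Int.mod n d = 0)).filter
          (fun d => prev ≠ some d)).card : Int) := by
  intro l
  induction l with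
  | nil => intro prev cnt _ _; simp [altScan]
  | cons d rest ih =>
    intro prev cnt hpw hlb
    have hdle : ∀ x ∈ rest, d ≤ x := fun x hx => (List.pairwise_cons.mp hpw).1 x hx
    have hrest := (List.pairwise_cons.mp hpw).2
    by_cases hprev : prev = some d
    · -- duplicate of prev: skipped
      rw [show altScan n (d :: rest) prev cnt = altScan n rest prev cnt by
        simp [altScan, hprev]]
      rw [ih prev cnt hrest (fun x hx p hp => hlb x (List.mem_cons_of_mem d hx) p hp)]
      have hsame :
          (((d :: rest).toFinset.filter (fun x => x ≠ 0 ∧ PySem.Int.mod n x = 0)).filter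
            (fun x => prev ≠ some x)) =
          ((rest.toFinset.filter (fun x => x ≠ 0 ∧ PySem.Int.mod n x = 0)).filter
            (fun x => prev ≠ some x)) := by
        ext x
        simp only [List.toFinset_cons, Finset.mem_filter, Finset.mem_insert,
          List.mem_toFinset, hprev]
        constructor
        · rintro ⟨⟨hx, hp⟩, hne⟩
          rcases hx with rfl | hx
          · exact absurd rfl hne
          · exact ⟨⟨hx, hp⟩, hne⟩
        · rintro ⟨⟨hx, hp⟩, hne⟩
          exact ⟨⟨Or.inr hx, hp⟩, hne⟩
      rw [hsame]
    · -- new run: prev becomes some d, count if nonzero divisor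
      have hlb' : ∀ x ∈ rest, ∀ p, (some d : Option Int) = some p → p ≤ x := by
        rintro x hx p hp
        cases hp
        exact hdle x hx
      have hprev_ne : ∀ x, x = d ∨ x ∈ rest → prev ≠ some x := by
        rintro x hx hpx
        rcases hx with rfl | hx
        · exact hprev hpx
        · have h1 : x ≤ d := hlb d List.mem_cons_self x hpx
          have h2 : d ≤ x := hdle x hx
          exact hprev (by rw [hpx, le_antisymm h1 h2])
      have hdnotmem_erase : d ∉ (rest.toFinset.filter
          (fun x => x ≠ 0 ∧ PySem.Int.mod n x = 0)).erase d := Finset.notMem_erase d _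
      have hrest_eq :
          ((rest.toFinset.filter (fun x => x ≠ 0 ∧ PySem.Int.mod n x = 0)).filter
            (fun x => (some d : Option Int) ≠ some x)) =
          (rest.toFinset.filter (fun x => x ≠ 0 ∧ PySem.Int.mod n x = 0)).erase d := by
        ext x
        simp only [Finset.mem_filter, Finset.mem_erase]
        constructor
        · rintro ⟨hx, hne⟩; exact ⟨fun h => hne (by rw [h]), hx⟩
        · rintro ⟨hne, hx⟩; exact ⟨hx, fun h => hne (by injection h; omega)⟩
      have houter :
          (((d :: rest).toFinset.filter (fun x => x ≠ 0 ∧ PySem.Int.mod n x = 0)).filter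
            (fun x => prev ≠ some x)) =
          ((d :: rest).toFinset.filter (fun x => x ≠ 0 ∧ PySem.Int.mod n x = 0)) := by
        apply Finset.filter_true_of_mem
        intro x hx
        have hx' := Finset.mem_filter.mp hx
        exact hprev_ne x (by simpa [List.mem_toFinset] using hx'.1)
      by_cases hp : d ≠ 0 ∧ PySem.Int.mod n d = 0
      · rw [show altScan n (d :: rest) prev cnt = altScan n rest (some d) (cnt + 1) by
          simp [altScan, hprev, hp]]
        rw [ih (some d) (cnt + 1) hrest hlb', hrest_eq, houter]
        simp only [List.toFinset_cons, Finset.filter_insert, if_pos hp]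
        rw [show insert d ((rest.toFinset.filter (fun x => x ≠ 0 ∧ PySem.Int.mod n x = 0))) =
            insert d ((rest.toFinset.filter (fun x => x ≠ 0 ∧ PySem.Int.mod n x = 0)).erase d) by
          ext x; simp only [Finset.mem_insert, Finset.mem_erase]; tauto]
        rw [Finset.card_insert_of_notMem hdnotmem_erase]
        push_cast
        ring
      · rw [show altScan n (d :: rest) prev cnt = altScan n rest (some d) cnt by
          simp [altScan, hprev, hp]]
        rw [ih (some d) cnt hrest hlb', hrest_eq, houter]
        simp only [List.toFinset_cons, Finset.filter_insert, if_neg hp]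
        have herase_eq :
            (rest.toFinset.filter (fun x => x ≠ 0 ∧ PySem.Int.mod n x = 0)).erase d =
            rest.toFinset.filter (fun x => x ≠ 0 ∧ PySem.Int.mod n x = 0) := by
          ext x
          simp only [Finset.mem_erase, Finset.mem_filter]
          constructor
          · rintro ⟨hne, hx, hpx⟩; exact ⟨hx, hpx⟩
          · rintro ⟨hx, hpx⟩
            refine ⟨fun h => hp (h ▸ hpx), hx, hpx⟩
        rw [herase_eq]

-- B's scan on the sorted list counts the distinct nonzero divisors among the values
theorem altScan_sorted (n : Int) (vals : List Int) :
    altScan n (PySem.List.sorted vals (fun x => x) false) none 0 =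
      ((vals.toFinset.filter (fun d => d ≠ 0 ∧ PySem.Int.mod n d = 0)).card : Int) := by
  rw [altScan_eq n (PySem.List.sorted vals (fun x => x) false) none 0
      (by simpa using PySem.List.sorted_pairwise vals (fun x => x))
      (by intro x _ p hp; cases hp)]
  have hfs : (PySem.List.sorted vals (fun x => x) false).toFinset = vals.toFinset := by
    ext x
    simp [PySem.List.mem_sorted]
  rw [hfs]
  simp

-- ===== VERDICT (by name: the statement is the Claim_ definition above) =====
theorem solution_spec : Claim_equal_solution := by
  intro n k _hdom hpre
  unfold Spec_solution solution solution_alt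
  rw [solutionGo_eq n k (PySem.Int.toChars n) ((PySem.Int.toChars n).length + 1) 0 0
    PySem.Set.empty (by have := hpre.1; omega)]
  rw [altScan_sorted]
  simp [PySem.Set.empty]
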